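-- pv_equiv track=rewrite | github.com/georgeaholden/jimbot-py | linkfinder.py | linkfinder
-- ===== SOURCE A (Python) =====
-- SHOP = ['shop', 'store', 'things']
--
-- MC = ['mine', 'craft', 'mc']
--
-- HELP = """I currently know about:
-- slimjimsthings.com
-- The jims movie sheet
-- The jimDev Doc
-- The jims game sheet
-- The MC Server Address"""
--
-- def linkfinder(query):
--     query = query.strip().lower()
--     if 'help' in query:
--         return HELP
--     for phrase in SHOP:
--         if phrase in query:
--             return "https://slimjimsthings.com/"
--     if 'movie' in query:
--         return "https://docs.google.com/document/d/1fKXEQ2yVU_y_A9jowsXQH0r8pQ4zREiu-Rj7hRCqNQw/edit?usp=sharing"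
--     if 'dev' in query:
--         return "https://docs.google.com/document/d/1d-6VmkRiD2zlFNqHNVP43PP9EQ9KVP8zwdfOeTiN4Lo/edit?usp=sharing"
--     if 'game' in query:
--         return "https://docs.google.com/spreadsheets/d/12ILuG2T99PL1-gjGyGUCf1GMb7N-uvG66wf5OGYv4mM/edit?usp=sharing"
--     for phrase in MC:
--         if phrase in query:
--             return 'The Current MC Server is Running on: 34.71.253.85'
-- ===== SOURCE B (Python) =====
-- HELP = """I currently know about:
-- slimjimsthings.com
-- The jims movie sheet
-- The jimDev Doc
-- The jims game sheet
-- The MC Server Address"""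
--
-- # keyword -> priority (alphabetical; order is irrelevant because we aggregate with min)
-- KEYWORDS = {
--     'craft': 5, 'dev': 3, 'game': 4, 'help': 0, 'mc': 5,
--     'mine': 5, 'movie': 2, 'shop': 1, 'store': 1, 'things': 1,
-- }
--
-- RESULTS = [
--     HELP,
--     "https://slimjimsthings.com/",
--     "https://docs.google.com/document/d/1fKXEQ2yVU_y_A9jowsXQH0r8pQ4zREiu-Rj7hRCqNQw/edit?usp=sharing",
--     "https://docs.google.com/document/d/1d-6VmkRiD2zlFNqHNVP43PP9EQ9KVP8zwdfOeTiN4Lo/edit?usp=sharing",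
--     "https://docs.google.com/spreadsheets/d/12ILuG2T99PL1-gjGyGUCf1GMb7N-uvG66wf5OGYv4mM/edit?usp=sharing",
--     'The Current MC Server is Running on: 34.71.253.85',
-- ]
--
-- def linkfinder(query):
--     q = query.strip().lower()
--     hits = [prio for kw, prio in KEYWORDS.items() if kw in q]
--     if not hits:
--         return None
--     return RESULTS[min(hits)]
-- ===== Notes on version B (the rewrite author's own statement) =====
-- stated objective: alternative
-- what changed: Replaced the ordered early-return if-chain (with two embedded keyword loops) by an aggregation: a keyword-to-priority map is scored against the query, the minimum matched priority is taken, and a result table is indexed; no early return and no rule-order scan.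
import Mathlib
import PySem

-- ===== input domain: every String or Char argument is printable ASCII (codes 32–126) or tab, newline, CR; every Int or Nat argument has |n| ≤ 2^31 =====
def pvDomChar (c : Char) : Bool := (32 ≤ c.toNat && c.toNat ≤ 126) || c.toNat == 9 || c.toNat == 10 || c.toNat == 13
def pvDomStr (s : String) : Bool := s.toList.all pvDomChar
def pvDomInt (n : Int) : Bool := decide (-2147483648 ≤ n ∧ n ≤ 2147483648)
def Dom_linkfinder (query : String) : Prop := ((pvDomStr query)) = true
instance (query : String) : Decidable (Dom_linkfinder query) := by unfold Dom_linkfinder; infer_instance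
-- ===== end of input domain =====

-- B replaces A's ordered early-return if-chain by an aggregation: every keyword carries a
-- priority, B collects the priorities of all matched keywords, takes their minimum and
-- indexes a result table (objective: alternative).

def pvHELP : String := "I currently know about:\nslimjimsthings.com\nThe jims movie sheet\nThe jimDev Doc\nThe jims game sheet\nThe MC Server Address"
def pvSHOP : List String := ["shop", "store", "things"]
def pvMC : List String := ["mine", "craft", "mc"]

-- ===== PORT A =====
-- 'for phrase in L: if phrase in q: return r' — first-match scan over the phrase list
def pvScanA (phrases : List String) (q : String) (r : String) : Option String :=
  match phrases with
  | [] => none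
  | p :: rest => if PySem.Str.isIn p q then some r else pvScanA rest q r

def linkfinder (query : String) : Option String :=
  let query := PySem.Str.lower (PySem.Str.strip query)
  if PySem.Str.isIn "help" query then some pvHELP
  -- the SHOP loop may early-return; otherwise control falls through to the if-chain (orElse)
  else (pvScanA pvSHOP query "https://slimjimsthings.com/").orElse (fun _ =>
    if PySem.Str.isIn "movie" query then
      some "https://docs.google.com/document/d/1fKXEQ2yVU_y_A9jowsXQH0r8pQ4zREiu-Rj7hRCqNQw/edit?usp=sharing"
    else if PySem.Str.isIn "dev" query then
      some "https://docs.google.com/document/d/1d-6VmkRiD2zlFNqHNVP43PP9EQ9KVP8zwdfOeTiN4Lo/edit?usp=sharing"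
    else if PySem.Str.isIn "game" query then
      some "https://docs.google.com/spreadsheets/d/12ILuG2T99PL1-gjGyGUCf1GMb7N-uvG66wf5OGYv4mM/edit?usp=sharing"
    -- final MC loop: returns its message on a match, else the function ends returning None
    else pvScanA pvMC query "The Current MC Server is Running on: 34.71.253.85")

-- ===== PORT B =====
-- keyword -> priority, alphabetical (a dict in Source B: association list in insertion order)
def pvKEYWORDS : List (String × Int) :=
  [("craft", 5), ("dev", 3), ("game", 4), ("help", 0), ("mc", 5),
   ("mine", 5), ("movie", 2), ("shop", 1), ("store", 1), ("things", 1)]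

def pvRESULTS : List String :=
  [pvHELP,
   "https://slimjimsthings.com/",
   "https://docs.google.com/document/d/1fKXEQ2yVU_y_A9jowsXQH0r8pQ4zREiu-Rj7hRCqNQw/edit?usp=sharing",
   "https://docs.google.com/document/d/1d-6VmkRiD2zlFNqHNVP43PP9EQ9KVP8zwdfOeTiN4Lo/edit?usp=sharing",
   "https://docs.google.com/spreadsheets/d/12ILuG2T99PL1-gjGyGUCf1GMb7N-uvG66wf5OGYv4mM/edit?usp=sharing",
   "The Current MC Server is Running on: 34.71.253.85"]

def linkfinder_alt (query : String) : Option String :=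
  let q := PySem.Str.lower (PySem.Str.strip query)
  -- hits = [prio for kw, prio in KEYWORDS.items() if kw in q]
  let hits := (pvKEYWORDS.filter fun e => PySem.Str.isIn e.1 q).map Prod.snd
  -- 'if not hits: return None' / 'return RESULTS[min(hits)]': min? is none exactly when
  -- hits is empty; pyGet? is RESULTS[m] (every priority is 0..5, hence in range, some _)
  (PySem.List.min? hits (fun x => x)).bind (fun m => PySem.List.pyGet? pvRESULTS m)

-- ===== PRECONDITION & SPEC =====
def Spec_linkfinder (query : String) (out : Option String) : Prop := out = linkfinder_alt query
instance (query : String) (out : Option String) : Decidable (Spec_linkfinder query out) := by unfold Spec_linkfinder; infer_instance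

-- ===== CLAIM (what is proved, stated in full; the proofs are below) =====
def Claim_equal_linkfinder : Prop := ∀ (query : String), Dom_linkfinder query → Spec_linkfinder query (linkfinder query)

-- ===== LEMMAS AND PROOFS =====
-- Both results depend on the input only through the ten membership booleans 'kw in query':
-- unfold both ports to decision trees over those booleans, abstract them, and check all
-- 2^10 assignments by kernel evaluation.
set_option maxHeartbeats 1000000 in
set_option maxRecDepth 8192 in
theorem linkfinder_eq_alt (query : String) : linkfinder query = linkfinder_alt query := by
  unfold linkfinder linkfinder_alt
  simp only [pvScanA, pvSHOP, pvMC, pvKEYWORDS, List.filter_cons, List.filter_nil]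
  generalize PySem.Str.isIn "help" (PySem.Str.lower (PySem.Str.strip query)) = b0
  generalize PySem.Str.isIn "shop" (PySem.Str.lower (PySem.Str.strip query)) = b1
  generalize PySem.Str.isIn "store" (PySem.Str.lower (PySem.Str.strip query)) = b2
  generalize PySem.Str.isIn "things" (PySem.Str.lower (PySem.Str.strip query)) = b3
  generalize PySem.Str.isIn "movie" (PySem.Str.lower (PySem.Str.strip query)) = b4
  generalize PySem.Str.isIn "dev" (PySem.Str.lower (PySem.Str.strip query)) = b5
  generalize PySem.Str.isIn "game" (PySem.Str.lower (PySem.Str.strip query)) = b6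
  generalize PySem.Str.isIn "mine" (PySem.Str.lower (PySem.Str.strip query)) = b7
  generalize PySem.Str.isIn "craft" (PySem.Str.lower (PySem.Str.strip query)) = b8
  generalize PySem.Str.isIn "mc" (PySem.Str.lower (PySem.Str.strip query)) = b9
  revert b0 b1 b2 b3 b4 b5 b6 b7 b8 b9
  decide

-- ===== VERDICT (by name: the statement is the Claim_ definition above) =====
theorem linkfinder_spec : Claim_equal_linkfinder := by
  intro query _
  unfold Spec_linkfinder
  exact linkfinder_eq_alt query
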